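-- pv_equiv track=rewrite | github.com/pj-cyber-sec/agm-cli | src/agm/jobs_common.py | _summarize_codex_token_usage
-- ===== SOURCE A (Python) =====
-- def _summarize_codex_token_usage(
--     turn_tokens: dict[str, tuple[int, int, int, int]],
-- ) -> dict[str, int]:
--     total_input = sum(t[0] for t in turn_tokens.values())
--     total_output = sum(t[1] for t in turn_tokens.values())
--     total_cached = sum(t[2] for t in turn_tokens.values())
--     total_reasoning = sum(t[3] for t in turn_tokens.values())
--     return {
--         "input_tokens": total_input,
--         "output_tokens": total_output,
--         "cached_input_tokens": total_cached,
--         "reasoning_tokens": total_reasoning,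
--     }
-- ===== SOURCE B (Python) =====
-- def _summarize_codex_token_usage(
--     turn_tokens: dict[str, tuple[int, int, int, int]],
-- ) -> dict[str, int]:
--     total_input = 0
--     total_output = 0
--     total_cached = 0
--     total_reasoning = 0
--     for t in turn_tokens.values():
--         total_input += t[0]
--         total_output += t[1]
--         total_cached += t[2]
--         total_reasoning += t[3]
--     return {
--         "input_tokens": total_input,
--         "output_tokens": total_output,
--         "cached_input_tokens": total_cached,
--         "reasoning_tokens": total_reasoning,
--     }
-- ===== Notes on version B (the rewrite author's own statement) =====
-- stated objective: alternative
-- what changed: Replaces the four separate sum() comprehensions (four traversals of the dict values) with a single loop maintaining four running accumulators.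
import Mathlib
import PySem

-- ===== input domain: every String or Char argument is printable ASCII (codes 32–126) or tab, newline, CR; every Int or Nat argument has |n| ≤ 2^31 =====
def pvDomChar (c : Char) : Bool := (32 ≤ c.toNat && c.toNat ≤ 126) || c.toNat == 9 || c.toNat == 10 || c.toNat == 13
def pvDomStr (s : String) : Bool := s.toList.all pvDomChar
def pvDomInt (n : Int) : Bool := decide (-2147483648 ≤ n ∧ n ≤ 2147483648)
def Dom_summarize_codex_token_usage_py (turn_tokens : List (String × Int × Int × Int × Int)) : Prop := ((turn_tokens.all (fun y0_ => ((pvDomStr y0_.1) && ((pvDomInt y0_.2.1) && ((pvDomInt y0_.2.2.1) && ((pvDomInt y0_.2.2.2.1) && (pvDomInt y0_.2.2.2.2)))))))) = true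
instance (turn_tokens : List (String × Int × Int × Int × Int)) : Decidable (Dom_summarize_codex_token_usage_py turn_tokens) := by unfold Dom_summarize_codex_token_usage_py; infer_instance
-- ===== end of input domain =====

-- ===== PORT A =====
-- A: four separate sum(...) passes over turn_tokens.values(), each a fold over the mapped component.
def summarize_codex_token_usage_py (turn_tokens : List (String × Int × Int × Int × Int)) : List (String × Int) :=
  let total_input := (turn_tokens.map (fun t => t.2.1)).foldl (· + ·) 0
  let total_output := (turn_tokens.map (fun t => t.2.2.1)).foldl (· + ·) 0
  let total_cached := (turn_tokens.map (fun t => t.2.2.2.1)).foldl (· + ·) 0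
  let total_reasoning := (turn_tokens.map (fun t => t.2.2.2.2)).foldl (· + ·) 0
  [("input_tokens", total_input), ("output_tokens", total_output),
   ("cached_input_tokens", total_cached), ("reasoning_tokens", total_reasoning)]

-- ===== PORT B =====
-- B: one loop over the values keeping four running accumulators.
def pvBLoop : List (String × Int × Int × Int × Int) → Int × Int × Int × Int → Int × Int × Int × Int
  | [], acc => acc
  | t :: ts, (a, b, c, d) => pvBLoop ts (a + t.2.1, b + t.2.2.1, c + t.2.2.2.1, d + t.2.2.2.2)

def summarize_codex_token_usage_py_alt (turn_tokens : List (String × Int × Int × Int × Int)) : List (String × Int) :=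
  let r := pvBLoop turn_tokens (0, 0, 0, 0)
  [("input_tokens", r.1), ("output_tokens", r.2.1),
   ("cached_input_tokens", r.2.2.1), ("reasoning_tokens", r.2.2.2)]

-- ===== PRECONDITION & SPEC =====
def Spec_summarize_codex_token_usage_py (turn_tokens : List (String × Int × Int × Int × Int)) (out : List (String × Int)) : Prop := out = summarize_codex_token_usage_py_alt turn_tokens
instance (turn_tokens : List (String × Int × Int × Int × Int)) (out : List (String × Int)) : Decidable (Spec_summarize_codex_token_usage_py turn_tokens out) := by unfold Spec_summarize_codex_token_usage_py; infer_instance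

-- ===== CLAIM (what is proved, stated in full; the proofs are below) =====
def Claim_equal_summarize_codex_token_usage_py : Prop := ∀ (turn_tokens : List (String × Int × Int × Int × Int)), Dom_summarize_codex_token_usage_py turn_tokens → Spec_summarize_codex_token_usage_py turn_tokens (summarize_codex_token_usage_py turn_tokens)

-- ===== LEMMAS AND PROOFS =====

-- ===== VERDICT (by name: the statement is the Claim_ definition above) =====
theorem pvBLoop_eq_folds : ∀ (ts : List (String × Int × Int × Int × Int)) (a b c d : Int),
    pvBLoop ts (a, b, c, d) =
      ((ts.map (fun t => t.2.1)).foldl (· + ·) a,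
       (ts.map (fun t => t.2.2.1)).foldl (· + ·) b,
       (ts.map (fun t => t.2.2.2.1)).foldl (· + ·) c,
       (ts.map (fun t => t.2.2.2.2)).foldl (· + ·) d)
  | [], a, b, c, d => rfl
  | t :: ts, a, b, c, d => by
      simp [pvBLoop, List.map, pvBLoop_eq_folds ts]

theorem summarize_codex_token_usage_py_spec : Claim_equal_summarize_codex_token_usage_py := by
  intro ts _
  unfold Spec_summarize_codex_token_usage_py
  simp [summarize_codex_token_usage_py, summarize_codex_token_usage_py_alt, pvBLoop_eq_folds]
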